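-- pv_equiv track=rewrite | github.com/eliasubz/AHLT | 1.2.NERC-NN/bin/analyze_results.py | decode_feat_str
-- ===== SOURCE A (Python) =====
-- FEAT_DECODE = {
--     "Or": "ortho",
--     "EF": "ext_full",
--     "EP": "ext_part",
--     "DM": "drug_morph",
--     "Gk": "greek",
--     "Ln": "length",
--     "Sp": "spacy",
--     "Sh": "shape",
--     "BL": "biolex",
-- }
--
-- def decode_feat_str(s):
--     """Turn 'OrEFEP' → 'ortho+ext_full+ext_part'."""
--     decoded = []
--     i = 0
--     while i < len(s):
--         matched = False
--         for code in sorted(FEAT_DECODE, key=len, reverse=True):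
--             if s[i:].startswith(code):
--                 decoded.append(FEAT_DECODE[code])
--                 i += len(code)
--                 matched = True
--                 break
--         if not matched:
--             decoded.append(s[i])
--             i += 1
--     return "+".join(decoded)
-- ===== SOURCE B (Python) =====
-- FEAT_DECODE = {
--     "Or": "ortho",
--     "EF": "ext_full",
--     "EP": "ext_part",
--     "DM": "drug_morph",
--     "Gk": "greek",
--     "Ln": "length",
--     "Sp": "spacy",
--     "Sh": "shape",
--     "BL": "biolex",
-- }
--
-- def decode_feat_str(s):
--     """Turn 'OrEFEP' → 'ortho+ext_full+ext_part'."""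
--     tokens = []
--     i = 0
--     while i < len(s):
--         tok = s[i:i + 2]
--         if tok in FEAT_DECODE:
--             i += 2
--         else:
--             tok = s[i]
--             i += 1
--         tokens.append(tok)
--     return "+".join(FEAT_DECODE.get(t, t) for t in tokens)
-- ===== Notes on version B (the rewrite author's own statement) =====
-- stated objective: faster
-- what changed: B tokenizes the string in one pass by testing the 2-char slice directly for dict membership and then decodes the token list with a single join, instead of A's per-position inner loop that re-sorts the key list and runs startswith for each candidate code.
import Mathlib
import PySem

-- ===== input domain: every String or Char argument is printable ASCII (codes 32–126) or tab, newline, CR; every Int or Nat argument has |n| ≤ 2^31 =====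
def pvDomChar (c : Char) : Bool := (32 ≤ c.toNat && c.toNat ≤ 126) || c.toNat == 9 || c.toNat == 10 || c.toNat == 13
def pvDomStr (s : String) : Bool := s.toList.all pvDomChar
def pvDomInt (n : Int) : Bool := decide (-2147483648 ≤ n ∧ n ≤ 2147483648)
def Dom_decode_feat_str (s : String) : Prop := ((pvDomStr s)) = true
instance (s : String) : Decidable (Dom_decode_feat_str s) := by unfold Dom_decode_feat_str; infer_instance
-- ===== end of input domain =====

-- B replaces A's per-position inner loop (which re-sorts the key list and runs startswith on
-- each candidate) by a one-pass tokenizer using a direct dict-membership test on the 2-char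
-- slice, then decodes the token list with a single join; measurably faster by a constant factor.

-- ===== PORT A =====
-- the module constant FEAT_DECODE (shared by both ports, like the Python module constant)
def featDecode : PySem.Dict String String :=
  PySem.Dict.ofList [("Or","ortho"),("EF","ext_full"),("EP","ext_part"),("DM","drug_morph"),
                     ("Gk","greek"),("Ln","length"),("Sp","spacy"),("Sh","shape"),("BL","biolex")]

-- sorted(FEAT_DECODE, key=len, reverse=True)  (A recomputes it each iteration; it is a pure
-- constant, so hoisting it is value-preserving)
def sortedCodesA : List String :=
  PySem.List.sorted (PySem.Dict.keys featDecode) (fun c => c.length) true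

-- the inner 'for code in …: if s[i:].startswith(code): … break' loop, returning the found code
def findCodeA : List String → List Char → Option String
  | [], _ => none
  | code :: rest, rem =>
    if PySem.Chars.startswith rem code.toList then some code else findCodeA rest rem

-- needed by loopA's termination: the found code is one of the candidates
theorem findCodeA_mem {codes : List String} {rem : List Char} {code : String}
    (h : findCodeA codes rem = some code) : code ∈ codes := by
  induction codes with
  | nil => simp [findCodeA] at h
  | cons c rest ih =>
    by_cases hc : PySem.Chars.startswith rem c.toList
    · simp [findCodeA, hc] at h; simp [h]
    · simp [findCodeA, hc] at h; exact List.mem_cons_of_mem _ (ih h)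

-- the while-loop of A: rem is s[i:], acc is 'decoded'
def loopA : List Char → List String → List String
  | [], acc => acc
  | c :: tail, acc =>
    match hf : findCodeA sortedCodesA (c :: tail) with
    | some code =>
        -- FEAT_DECODE[code]: the key is always present (code ∈ keys), so the "" default is never used
        loopA ((c :: tail).drop code.toList.length) (acc ++ [PySem.Dict.getD featDecode code ""])
    | none => loopA tail (acc ++ [String.ofList [c]])
  termination_by rem _ => rem.length
  decreasing_by
  · have hmem := findCodeA_mem hf
    have h2 : code.toList.length = 2 := by
      have : ∀ x ∈ sortedCodesA, x.toList.length = 2 := by decide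
      exact this _ hmem
    simp [h2]
  · simp

def decode_feat_str (s : String) : String :=
  PySem.Str.join "+" (loopA s.toList [])

-- ===== PORT B =====
-- the tokenizing while-loop of B: rem is s[i:], acc is 'tokens'
def tokenLoopB : List Char → List String → List String
  | [], acc => acc
  | c :: tail, acc =>
    let tok := String.ofList ((c :: tail).take 2)     -- s[i:i+2]
    if PySem.Dict.contains featDecode tok then
      tokenLoopB ((c :: tail).drop 2) (acc ++ [tok])
    else
      tokenLoopB tail (acc ++ [String.ofList [c]])    -- tok = s[i]
  termination_by rem _ => rem.length
  decreasing_by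
  · simp
  · simp

def decode_feat_str_alt (s : String) : String :=
  PySem.Str.join "+" ((tokenLoopB s.toList []).map (fun t => PySem.Dict.getD featDecode t t))

-- ===== PRECONDITION & SPEC =====
def Spec_decode_feat_str (s : String) (out : String) : Prop := out = decode_feat_str_alt s
instance (s : String) (out : String) : Decidable (Spec_decode_feat_str s out) := by unfold Spec_decode_feat_str; infer_instance

-- ===== CLAIM (what is proved, stated in full; the proofs are below) =====
def Claim_equal_decode_feat_str : Prop := ∀ (s : String), Dom_decode_feat_str s → Spec_decode_feat_str s (decode_feat_str s)

-- ===== LEMMAS AND PROOFS =====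

-- the literal values of the two port-level constants
theorem sortedCodesA_eq : sortedCodesA = ["Or","EF","EP","DM","Gk","Ln","Sp","Sh","BL"] := by decide

theorem keys_featDecode : (featDecode).keys = ["Or","EF","EP","DM","Gk","Ln","Sp","Sh","BL"] := by decide

-- a two-character code never starts a one-character remainder
theorem sw_single (a b c : Char) : PySem.Chars.startswith [c] [a,b] = false := by
  rw [Bool.eq_false_iff]
  intro h
  rcases (PySem.Chars.startswith_iff _ _).mp h with ⟨t, ht⟩
  simp at ht

theorem sw_two (a b c1 c2 : Char) (rest : List Char) :
    PySem.Chars.startswith (c1 :: c2 :: rest) [a,b] = (decide (c1 = a) && decide (c2 = b)) := by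
  rw [Bool.eq_iff_iff, PySem.Chars.startswith_iff]
  constructor
  · rintro ⟨t, ht⟩
    simp at ht
    simp [ht.1, ht.2.1]
  · intro h
    simp at h
    exact ⟨rest, by simp [h.1, h.2]⟩

-- lookup with contains = true does not depend on the default
theorem getD_default_irrel (d : PySem.Dict String String) (k a b : String)
    (h : d.contains k = true) : d.getD k a = d.getD k b := by
  rw [PySem.Dict.getD_eq_get?_getD, PySem.Dict.getD_eq_get?_getD]
  have hs : (d.get? k).isSome := by
    rw [← PySem.Dict.contains_eq_isSome_get? d k]; exact h
  rcases Option.isSome_iff_exists.mp hs with ⟨v, hv⟩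
  simp [hv]

-- which two-character strings are keys of FEAT_DECODE
theorem contains_two (c1 c2 : Char) : (PySem.Dict.contains featDecode (String.ofList [c1,c2]) = true) ↔
    (c1 = 'O' ∧ c2 = 'r') ∨ (c1 = 'E' ∧ c2 = 'F') ∨ (c1 = 'E' ∧ c2 = 'P') ∨ (c1 = 'D' ∧ c2 = 'M') ∨
    (c1 = 'G' ∧ c2 = 'k') ∨ (c1 = 'L' ∧ c2 = 'n') ∨ (c1 = 'S' ∧ c2 = 'p') ∨ (c1 = 'S' ∧ c2 = 'h') ∨
    (c1 = 'B' ∧ c2 = 'L') := by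
  rw [PySem.Dict.contains_iff_mem_keys, keys_featDecode]
  simp [String.ext_iff]

-- no one-character string is a key
theorem contains_one (c : Char) : PySem.Dict.contains featDecode (String.ofList [c]) = false := by
  rw [Bool.eq_false_iff, Ne, PySem.Dict.contains_iff_mem_keys, keys_featDecode]
  simp [String.ext_iff]

-- A's inner loop finds exactly the dict key starting at position i (codes are the keys, all of length 2)
set_option maxHeartbeats 2000000 in
theorem stepA (c1 c2 : Char) (rest : List Char) :
    findCodeA sortedCodesA (c1 :: c2 :: rest) =
      (if PySem.Dict.contains featDecode (String.ofList [c1, c2]) then some (String.ofList [c1, c2]) else none) := by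
  rw [sortedCodesA_eq]
  simp only [findCodeA,
    show ("Or".toList) = ['O','r'] from by decide, show ("EF".toList) = ['E','F'] from by decide,
    show ("EP".toList) = ['E','P'] from by decide, show ("DM".toList) = ['D','M'] from by decide,
    show ("Gk".toList) = ['G','k'] from by decide, show ("Ln".toList) = ['L','n'] from by decide,
    show ("Sp".toList) = ['S','p'] from by decide, show ("Sh".toList) = ['S','h'] from by decide,
    show ("BL".toList) = ['B','L'] from by decide, sw_two]
  by_cases h1 : c1 = 'O' ∧ c2 = 'r'
  · obtain ⟨rfl, rfl⟩ := h1; decide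
  rw [if_neg (by simpa using h1)]
  by_cases h2 : c1 = 'E' ∧ c2 = 'F'
  · obtain ⟨rfl, rfl⟩ := h2; decide
  rw [if_neg (by simpa using h2)]
  by_cases h3 : c1 = 'E' ∧ c2 = 'P'
  · obtain ⟨rfl, rfl⟩ := h3; decide
  rw [if_neg (by simpa using h3)]
  by_cases h4 : c1 = 'D' ∧ c2 = 'M'
  · obtain ⟨rfl, rfl⟩ := h4; decide
  rw [if_neg (by simpa using h4)]
  by_cases h5 : c1 = 'G' ∧ c2 = 'k'
  · obtain ⟨rfl, rfl⟩ := h5; decide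
  rw [if_neg (by simpa using h5)]
  by_cases h6 : c1 = 'L' ∧ c2 = 'n'
  · obtain ⟨rfl, rfl⟩ := h6; decide
  rw [if_neg (by simpa using h6)]
  by_cases h7 : c1 = 'S' ∧ c2 = 'p'
  · obtain ⟨rfl, rfl⟩ := h7; decide
  rw [if_neg (by simpa using h7)]
  by_cases h8 : c1 = 'S' ∧ c2 = 'h'
  · obtain ⟨rfl, rfl⟩ := h8; decide
  rw [if_neg (by simpa using h8)]
  by_cases h9 : c1 = 'B' ∧ c2 = 'L'
  · obtain ⟨rfl, rfl⟩ := h9; decide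
  rw [if_neg (by simpa using h9)]
  have hc : ¬ (PySem.Dict.contains featDecode (String.ofList [c1, c2]) = true) := by
    rw [contains_two]; tauto
  rw [if_neg hc]

theorem findCodeA_single (c : Char) : findCodeA sortedCodesA [c] = none := by
  rw [sortedCodesA_eq]
  simp [findCodeA, sw_single]

-- the common token list both loops produce
def toks : List Char → List String
  | [] => []
  | [c] => [String.ofList [c]]
  | c1 :: c2 :: rest =>
    if PySem.Dict.contains featDecode (String.ofList [c1, c2]) then
      String.ofList [c1, c2] :: toks rest
    else
      String.ofList [c1] :: toks (c2 :: rest)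

theorem tokenLoopB_eq_aux (n : Nat) : ∀ (cs : List Char), cs.length ≤ n → ∀ (acc : List String),
    tokenLoopB cs acc = acc ++ toks cs := by
  induction n with
  | zero =>
    intro cs h acc
    have : cs = [] := List.length_eq_zero_iff.mp (Nat.le_zero.mp h)
    subst this
    simp [tokenLoopB, toks]
  | succ n ih =>
    intro cs h acc
    match cs with
    | [] => simp [tokenLoopB, toks]
    | [c] =>
      rw [tokenLoopB.eq_2]
      simp only [List.take_succ_cons, List.take_nil, List.drop_succ_cons, List.drop_nil]
      rw [if_neg (by rw [contains_one]; simp), tokenLoopB.eq_1]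
      simp [toks]
    | c1 :: c2 :: rest =>
      rw [tokenLoopB.eq_2]
      simp only [List.take_succ_cons, List.take_zero, List.drop_succ_cons, List.drop_zero]
      by_cases hc : PySem.Dict.contains featDecode (String.ofList [c1, c2]) = true
      · rw [if_pos hc, ih rest (by simp at h ⊢; omega)]
        simp [toks, hc]
      · rw [if_neg hc, ih (c2 :: rest) (by simp at h ⊢; omega)]
        simp [toks, hc]

theorem tokenLoopB_eq (cs : List Char) (acc : List String) :
    tokenLoopB cs acc = acc ++ toks cs :=
  tokenLoopB_eq_aux cs.length cs le_rfl acc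

theorem loopA_eq_aux (n : Nat) : ∀ (cs : List Char), cs.length ≤ n → ∀ (acc : List String),
    loopA cs acc = acc ++ (toks cs).map (fun t => PySem.Dict.getD featDecode t t) := by
  induction n with
  | zero =>
    intro cs h acc
    have : cs = [] := List.length_eq_zero_iff.mp (Nat.le_zero.mp h)
    subst this
    simp [loopA, toks]
  | succ n ih =>
    intro cs h acc
    match cs with
    | [] => simp [loopA, toks]
    | [c] =>
      rw [loopA.eq_2]
      split
      · next code heq => rw [findCodeA_single] at heq; exact absurd heq (by simp)
      · next heq =>
        rw [loopA.eq_1]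
        simp only [toks, List.map]
        rw [PySem.Dict.getD_of_not_contains _ _ (contains_one c)]
    | c1 :: c2 :: rest =>
      rw [loopA.eq_2]
      split
      · next code heq =>
        rw [stepA] at heq
        by_cases hc : PySem.Dict.contains featDecode (String.ofList [c1, c2]) = true
        · rw [if_pos hc] at heq
          injection heq with heq
          subst heq
          have hdrop : (c1 :: c2 :: rest).drop (String.ofList [c1, c2]).toList.length = rest := by simp
          rw [hdrop, ih rest (by simp at h ⊢; omega)]
          simp only [toks, if_pos hc, List.map, List.append_assoc, List.cons_append,
            List.nil_append]
          rw [getD_default_irrel _ _ _ (String.ofList [c1, c2]) hc]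
        · rw [if_neg hc] at heq; exact absurd heq (by simp)
      · next heq =>
        rw [stepA] at heq
        by_cases hc : PySem.Dict.contains featDecode (String.ofList [c1, c2]) = true
        · rw [if_pos hc] at heq; exact absurd heq (by simp)
        · rw [ih (c2 :: rest) (by simp at h ⊢; omega)]
          simp only [toks, if_neg hc, List.map, List.append_assoc, List.cons_append,
            List.nil_append]
          rw [PySem.Dict.getD_of_not_contains _ _ (contains_one c1)]

theorem loopA_eq (cs : List Char) (acc : List String) :
    loopA cs acc = acc ++ (toks cs).map (fun t => PySem.Dict.getD featDecode t t) :=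
  loopA_eq_aux cs.length cs le_rfl acc

-- ===== VERDICT (by name: the statement is the Claim_ definition above) =====
theorem decode_feat_str_spec : Claim_equal_decode_feat_str := by
  intro s _
  unfold Spec_decode_feat_str decode_feat_str decode_feat_str_alt
  rw [loopA_eq, tokenLoopB_eq]
  simp
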